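-- pv_equiv track=rewrite | github.com/seancheick/PharmaGuide_Pipeline | scripts/archive/migrate_banned_to_v3.py | infer_ingredient_type
-- ===== SOURCE A (Python) =====
-- from typing import Dict, List, Any, Optional
--
-- def infer_ingredient_type(item: Dict, category: str) -> str:
--     """Infer ingredient_type based on category and item data."""
--     name = item.get("standard_name", "").lower()
--     category_lower = category.lower()
--
--     if "botanical" in name or any(x in category_lower for x in ["botanical", "herb"]):
--         return "botanical"
--     if any(x in category_lower for x in ["pharmaceutical", "drug", "spiking"]):
--         return "pharmaceutical"
--     if "peptide" in category_lower or "peptide" in name: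
--         return "peptide"
--     if "hormone" in name or "igf" in name:
--         return "hormone"
--     if any(x in category_lower for x in ["heavy_metal", "contaminant"]):
--         return "contaminant"
--     if any(x in category_lower for x in ["nootropic", "racetam"]):
--         return "synthetic"
--     if any(x in category_lower for x in ["sarm", "steroid"]):
--         return "synthetic"
--     if any(x in name for x in ["stimulant", "dmaa", "dmha"]):
--         return "synthetic"
--     return "synthetic"  # Default
-- ===== SOURCE B (Python) =====
-- from typing import Dict
--
-- # Flat keyword table: (keyword, tested-against-name?, priority).
-- # Priorities index _LABELS; 5 ("synthetic") is the default when nothing matches.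
-- _KEYWORDS = [
--     ("botanical", True, 0), ("botanical", False, 0), ("herb", False, 0),
--     ("pharmaceutical", False, 1), ("drug", False, 1), ("spiking", False, 1),
--     ("peptide", False, 2), ("peptide", True, 2),
--     ("hormone", True, 3), ("igf", True, 3),
--     ("heavy_metal", False, 4), ("contaminant", False, 4),
-- ]
-- _LABELS = ["botanical", "pharmaceutical", "peptide", "hormone", "contaminant", "synthetic"]
--
-- def infer_ingredient_type(item: Dict, category: str) -> str:
--     """Infer ingredient_type based on category and item data."""
--     name = item.get("standard_name", "").lower()
--     category_lower = category.lower()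
--     hits = [p for kw, in_name, p in _KEYWORDS
--             if kw in (name if in_name else category_lower)]
--     return _LABELS[min(hits, default=5)]
-- ===== Notes on version B (the rewrite author's own statement) =====
-- stated objective: alternative
-- what changed: Replaced the short-circuiting if/elif cascade by a two-stage computation: collect the priorities of ALL matching keywords from a flat (keyword, field, priority) table, then take the minimum priority and index into a label array; there is no early exit and no per-branch control flow.
import Mathlib
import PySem

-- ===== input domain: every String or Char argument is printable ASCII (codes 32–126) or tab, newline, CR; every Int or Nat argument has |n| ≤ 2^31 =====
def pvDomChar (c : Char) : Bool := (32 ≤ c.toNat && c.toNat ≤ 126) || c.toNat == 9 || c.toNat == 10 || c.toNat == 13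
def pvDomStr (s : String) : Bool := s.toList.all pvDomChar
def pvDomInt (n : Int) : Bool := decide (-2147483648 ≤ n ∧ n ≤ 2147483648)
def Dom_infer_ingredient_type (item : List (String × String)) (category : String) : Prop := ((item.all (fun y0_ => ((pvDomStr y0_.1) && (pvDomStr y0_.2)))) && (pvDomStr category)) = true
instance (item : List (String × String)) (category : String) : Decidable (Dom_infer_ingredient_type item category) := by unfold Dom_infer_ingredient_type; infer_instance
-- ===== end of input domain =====

-- B replaces A's short-circuiting if/elif cascade by a two-stage computation: collect the
-- priorities of ALL matching keywords from a flat table, take the minimum, index a label array.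

-- ===== PORT A =====
def infer_ingredient_type (item : List (String × String)) (category : String) : String :=
  let name := PySem.Str.lower (PySem.Dict.getD (PySem.Dict.ofList item) "standard_name" "")
  let category_lower := PySem.Str.lower category
  if PySem.Str.isIn "botanical" name || ["botanical", "herb"].any (fun x => PySem.Str.isIn x category_lower) then "botanical"
  else if ["pharmaceutical", "drug", "spiking"].any (fun x => PySem.Str.isIn x category_lower) then "pharmaceutical"
  else if PySem.Str.isIn "peptide" category_lower || PySem.Str.isIn "peptide" name then "peptide"
  else if PySem.Str.isIn "hormone" name || PySem.Str.isIn "igf" name then "hormone"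
  else if ["heavy_metal", "contaminant"].any (fun x => PySem.Str.isIn x category_lower) then "contaminant"
  else if ["nootropic", "racetam"].any (fun x => PySem.Str.isIn x category_lower) then "synthetic"
  else if ["sarm", "steroid"].any (fun x => PySem.Str.isIn x category_lower) then "synthetic"
  else if ["stimulant", "dmaa", "dmha"].any (fun x => PySem.Str.isIn x name) then "synthetic"
  else "synthetic"

-- ===== PORT B =====
-- flat keyword table: (keyword, tested-against-name?, priority); priorities index pvLabels
def pvKeywords : List (String × Bool × Nat) :=
  [("botanical", true, 0), ("botanical", false, 0), ("herb", false, 0),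
   ("pharmaceutical", false, 1), ("drug", false, 1), ("spiking", false, 1),
   ("peptide", false, 2), ("peptide", true, 2),
   ("hormone", true, 3), ("igf", true, 3),
   ("heavy_metal", false, 4), ("contaminant", false, 4)]

def pvLabels : List String := ["botanical", "pharmaceutical", "peptide", "hormone", "contaminant", "synthetic"]

def infer_ingredient_type_alt (item : List (String × String)) (category : String) : String :=
  let name := PySem.Str.lower (PySem.Dict.getD (PySem.Dict.ofList item) "standard_name" "")
  let category_lower := PySem.Str.lower category
  let hits := (pvKeywords.filter
      (fun r => PySem.Str.isIn r.1 (if r.2.1 then name else category_lower))).map (fun r => r.2.2)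
  (PySem.List.pyGet? pvLabels (((PySem.List.min? hits (fun p => p)).getD 5 : Nat) : Int)).getD ""

-- ===== PRECONDITION & SPEC =====
def Spec_infer_ingredient_type (item : List (String × String)) (category : String) (out : String) : Prop := out = infer_ingredient_type_alt item category
instance (item : List (String × String)) (category : String) (out : String) : Decidable (Spec_infer_ingredient_type item category out) := by unfold Spec_infer_ingredient_type; infer_instance

-- ===== CLAIM (what is proved, stated in full; the proofs are below) =====
def Claim_equal_infer_ingredient_type : Prop := ∀ (item : List (String × String)) (category : String), Dom_infer_ingredient_type item category → Spec_infer_ingredient_type item category (infer_ingredient_type item category)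

-- ===== LEMMAS AND PROOFS =====
set_option maxHeartbeats 4000000 in
theorem pvBody_eq (name cl : String) :
    (if PySem.Str.isIn "botanical" name || ["botanical", "herb"].any (fun x => PySem.Str.isIn x cl) then "botanical"
     else if ["pharmaceutical", "drug", "spiking"].any (fun x => PySem.Str.isIn x cl) then "pharmaceutical"
     else if PySem.Str.isIn "peptide" cl || PySem.Str.isIn "peptide" name then "peptide"
     else if PySem.Str.isIn "hormone" name || PySem.Str.isIn "igf" name then "hormone"
     else if ["heavy_metal", "contaminant"].any (fun x => PySem.Str.isIn x cl) then "contaminant"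
     else if ["nootropic", "racetam"].any (fun x => PySem.Str.isIn x cl) then "synthetic"
     else if ["sarm", "steroid"].any (fun x => PySem.Str.isIn x cl) then "synthetic"
     else if ["stimulant", "dmaa", "dmha"].any (fun x => PySem.Str.isIn x name) then "synthetic"
     else "synthetic")
    = (PySem.List.pyGet? pvLabels
        (((PySem.List.min? ((pvKeywords.filter
            (fun r => PySem.Str.isIn r.1 (if r.2.1 then name else cl))).map (fun r => r.2.2))
           (fun p => p)).getD 5 : Nat) : Int)).getD "" := by
  simp only [pvKeywords, pvLabels, List.filter, List.any_cons, List.any_nil, Bool.or_false,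
    Bool.false_eq_true, if_true, if_false]
  generalize PySem.Str.isIn "botanical" name = b1
  generalize PySem.Str.isIn "botanical" cl = b2
  generalize PySem.Str.isIn "herb" cl = b3
  generalize PySem.Str.isIn "pharmaceutical" cl = b4
  generalize PySem.Str.isIn "drug" cl = b5
  generalize PySem.Str.isIn "spiking" cl = b6
  generalize PySem.Str.isIn "peptide" cl = b7
  generalize PySem.Str.isIn "peptide" name = b8
  generalize PySem.Str.isIn "hormone" name = b9
  generalize PySem.Str.isIn "igf" name = b10
  generalize PySem.Str.isIn "heavy_metal" cl = b11
  generalize PySem.Str.isIn "contaminant" cl = b12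
  generalize PySem.Str.isIn "nootropic" cl = b13
  generalize PySem.Str.isIn "racetam" cl = b14
  generalize PySem.Str.isIn "sarm" cl = b15
  generalize PySem.Str.isIn "steroid" cl = b16
  generalize PySem.Str.isIn "stimulant" name = b17
  generalize PySem.Str.isIn "dmaa" name = b18
  generalize PySem.Str.isIn "dmha" name = b19
  simp only [ite_self]
  revert b1 b2 b3 b4 b5 b6 b7 b8 b9 b10 b11 b12
  decide

-- ===== VERDICT (by name: the statement is the Claim_ definition above) =====
theorem infer_ingredient_type_spec : Claim_equal_infer_ingredient_type := by
  intro item category _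
  unfold Spec_infer_ingredient_type infer_ingredient_type infer_ingredient_type_alt
  exact pvBody_eq _ _
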